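-- pv_equiv track=rewrite | github.com/kkm0406/Programmers | 연습문제/124 나라의 숫자.py | solution
-- ===== SOURCE A (Python) =====
-- def solution(n):
--     answer = ''
--     div = n-1
--     while True:
--         div, mod = divmod(div, 3)
--         if mod == 0:
--             answer += '1'
--         elif mod == 1:
--             answer += '2'
--         else:
--             answer += '4'
--         if div == 0:
--             break
--         div -= 1
--     return answer[::-1]
-- ===== SOURCE B (Python) =====
-- def solution(n):
--     # Two-phase: first find the digit length L (there are 3^L numbers of
--     # length L, the first being (3^L - 1)/2 + ... well, start), then write
--     # the 0-based offset m within that block in ordinary base 3, fixed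
--     # width L, with digit alphabet "124".
--     L, count, start = 1, 3, 1
--     while n >= start + count:
--         start += count
--         count *= 3
--         L += 1
--     m = n - start
--     out = ''
--     for _ in range(L):
--         out = "124"[m % 3] + out
--         m //= 3
--     return out
-- ===== Notes on version B (the rewrite author's own statement) =====
-- stated objective: alternative
-- what changed: B replaces A's per-digit divmod-with-borrow loop by a two-phase algorithm: it first finds the digit length L by walking the block sizes 3^L, then writes the 0-based offset within that block in ordinary fixed-width base 3 over the alphabet "124"; Pre_ excludes nonpositive n, on which A's while-True loop never terminates.
import Mathlib
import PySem

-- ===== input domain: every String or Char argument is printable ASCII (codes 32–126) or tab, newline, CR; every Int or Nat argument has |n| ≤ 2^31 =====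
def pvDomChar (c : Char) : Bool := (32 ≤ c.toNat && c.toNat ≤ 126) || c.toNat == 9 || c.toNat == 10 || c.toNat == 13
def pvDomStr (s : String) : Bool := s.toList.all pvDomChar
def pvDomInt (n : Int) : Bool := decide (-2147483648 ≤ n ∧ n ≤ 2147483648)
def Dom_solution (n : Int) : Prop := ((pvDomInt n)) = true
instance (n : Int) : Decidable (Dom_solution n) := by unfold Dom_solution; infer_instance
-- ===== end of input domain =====

-- B uses a different algorithm: it first determines the digit length L of the answer
-- (blocks of 3^L numbers), then writes the 0-based offset within that block in ordinary
-- fixed-width base 3 over the alphabet "124" — no per-digit borrow/decrement as in A.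

-- ===== PORT A =====
-- A's `while True` loop, transliterated with a fuel parameter (fuel only makes the
-- recursion total; with fuel ≥ div+1 it is never exhausted on the admitted inputs).
def solutionLoopA (fuel : Nat) (div : Int) (answer : String) : String :=
  match fuel with
  | 0 => answer
  | fuel + 1 =>
    let q := PySem.Int.floordiv div 3
    let m := PySem.Int.mod div 3
    let answer' := answer ++ (if m = 0 then "1" else if m = 1 then "2" else "4")
    if q = 0 then answer' else solutionLoopA fuel (q - 1) answer'

def solution (n : Int) : String :=
  (PySem.Str.slice? (solutionLoopA ((n - 1).toNat + 1) (n - 1) "") none none (-1)).getD ""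

-- ===== PORT B =====
-- `while n >= start + count: start += count; count *= 3; L += 1` (fuel = n.toNat only
-- makes the recursion total; the loop runs far fewer than n steps on admitted inputs).
def lenLoopB (fuel : Nat) (n L count start : Int) : Int × Int :=
  match fuel with
  | 0 => (L, start)
  | f + 1 =>
    if start + count ≤ n then lenLoopB f n (L + 1) (count * 3) (start + count)
    else (L, start)

-- `for _ in range(L): out = "124"[m % 3] + out; m //= 3`
-- ("124"[m % 3] never raises: m % 3 with Python's mod and divisor 3 is 0, 1 or 2)
def digitsLoopB (fuel : Nat) (m : Int) (out : String) : String :=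
  match fuel with
  | 0 => out
  | f + 1 =>
    digitsLoopB f (PySem.Int.floordiv m 3)
      (((PySem.Str.pyGet? "124" (PySem.Int.mod m 3)).getD ' ').toString ++ out)

def solution_alt (n : Int) : String :=
  match lenLoopB n.toNat n 1 3 1 with
  | (L, start) => digitsLoopB L.toNat (n - start) ""

-- ===== PRECONDITION & SPEC =====
-- Pre_ excludes n ≤ 0: there A's `while True` loop never reaches div = 0 and diverges.
def Pre_solution (n : Int) : Prop := 1 ≤ n
instance (n : Int) : Decidable (Pre_solution n) := by unfold Pre_solution; infer_instance
def pvWitness_solution : Int := (5)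

def Spec_solution (n : Int) (out : String) : Prop := out = solution_alt n
instance (n : Int) (out : String) : Decidable (Spec_solution n out) := by unfold Spec_solution; infer_instance

-- ===== CLAIM (what is proved, stated in full; the proofs are below) =====
def Claim_equal_solution : Prop := ∀ (n : Int), Dom_solution n → Pre_solution n → Spec_solution n (solution n)

-- ===== LEMMAS AND PROOFS =====

-- s j = (3^j - 1)/2: the value just below the first j-digit number (start of block = s j, 1-based n ≥ s j + 1? see lemmas)
def sInt (j : Nat) : Int := ((3:Int) ^ j - 1) / 2

def chD (r : Int) : Char := if r = 0 then '1' else if r = 1 then '2' else '4'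

-- low-first digit stream of A's loop
def gA (fuel : Nat) (div : Int) : List Char :=
  match fuel with
  | 0 => []
  | f + 1 => chD (div % 3) :: (if div / 3 = 0 then [] else gA f (div / 3 - 1))

-- low-first ordinary base-3 digits, fixed width
def dig (w : Nat) (m : Int) : List Char :=
  match w with
  | 0 => []
  | f + 1 => chD (m % 3) :: dig f (m / 3)

theorem sInt_add_pow (k : Nat) : sInt (k + 1) = sInt k + 3 ^ k := by
  have hodd : Odd ((3:Int) ^ k) := Odd.pow (by decide)
  obtain ⟨t, ht⟩ := hodd
  unfold sInt
  rw [pow_succ]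
  omega

theorem sInt_succ (k : Nat) : sInt (k + 1) = 3 * sInt k + 1 := by
  have hodd : Odd ((3:Int) ^ k) := Odd.pow (by decide)
  obtain ⟨t, ht⟩ := hodd
  unfold sInt
  rw [pow_succ]
  omega

theorem sInt_pos (k : Nat) : 1 ≤ sInt (k + 1) := by
  induction k with
  | zero => decide
  | succ k ih =>
    have h := sInt_add_pow (k + 1)
    have hp : (0:Int) < 3 ^ (k + 1) := pow_pos (by norm_num) _
    omega

theorem sInt_ge (j : Nat) : (j : Int) + 1 ≤ sInt (j + 1) := by
  induction j with
  | zero => decide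
  | succ j ih =>
    have h := sInt_add_pow (j + 1)
    have hp : (1:Int) ≤ 3 ^ (j + 1) := one_le_pow₀ (by norm_num)
    push_cast
    omega

theorem lt_sInt_self (t : Nat) : (t : Int) < sInt (t + 2) := by
  induction t with
  | zero => decide
  | succ t ih =>
    have h : sInt (t + 1 + 2) = sInt (t + 2) + 3 ^ (t + 2) := sInt_add_pow (t + 2)
    have hp : (1:Int) ≤ 3 ^ (t + 2) := one_le_pow₀ (by norm_num)
    push_cast
    push_cast at ih
    omega

theorem A_toList (fuel : Nat) : ∀ (div : Int) (a : String), 0 ≤ div →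
    (solutionLoopA fuel div a).toList = a.toList ++ gA fuel div := by
  induction fuel with
  | zero => intro div a _; simp [solutionLoopA, gA]
  | succ f ih =>
    intro div a hd
    have hq : PySem.Int.floordiv div 3 = div / 3 :=
      PySem.Int.floordiv_eq_ediv_of_pos (by omega)
    have hm : PySem.Int.mod div 3 = div % 3 :=
      PySem.Int.mod_eq_emod_of_pos (by omega)
    have hm3 : div % 3 = 0 ∨ div % 3 = 1 ∨ div % 3 = 2 := by omega
    simp only [solutionLoopA, hq, hm, gA]
    by_cases h0 : div / 3 = 0
    · rw [if_pos h0, if_pos h0]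
      rcases hm3 with h | h | h <;> simp [h, chD]
    · rw [if_neg h0, if_neg h0, ih _ _ (by omega)]
      rcases hm3 with h | h | h <;> simp [h, chD]

theorem B_toList (fuel : Nat) : ∀ (m : Int) (out : String),
    (digitsLoopB fuel m out).toList = (dig fuel m).reverse ++ out.toList := by
  induction fuel with
  | zero => intro m out; simp [digitsLoopB, dig]
  | succ f ih =>
    intro m out
    have hq : PySem.Int.floordiv m 3 = m / 3 :=
      PySem.Int.floordiv_eq_ediv_of_pos (by omega)
    have hmod : PySem.Int.mod m 3 = m % 3 :=
      PySem.Int.mod_eq_emod_of_pos (by omega)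
    have hm3 : m % 3 = 0 ∨ m % 3 = 1 ∨ m % 3 = 2 := by omega
    simp only [digitsLoopB, hq, hmod, dig, List.reverse_cons, List.append_assoc]
    rw [ih]
    rcases hm3 with h | h | h <;> simp [h, chD]

theorem lenLoop_spec (fuel : Nat) : ∀ (k : Nat) (n : Int),
    sInt (k + 1) ≤ n → n < sInt (k + 1 + fuel + 1) →
    ∃ j : Nat, lenLoopB fuel n ((k : Int) + 1) (3 ^ (k + 1)) (sInt (k + 1)) =
        ((j : Int) + 1, sInt (j + 1)) ∧ sInt (j + 1) ≤ n ∧ n < sInt (j + 2) := by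
  induction fuel with
  | zero =>
    intro k n h1 h2
    exact ⟨k, rfl, h1, by simpa using h2⟩
  | succ f ih =>
    intro k n h1 h2
    have hs : sInt (k + 1 + 1) = sInt (k + 1) + 3 ^ (k + 1) := sInt_add_pow (k + 1)
    simp only [lenLoopB]
    by_cases hle : sInt (k + 1) + 3 ^ (k + 1) ≤ n
    · rw [if_pos hle]
      have h2' : n < sInt (k + 1 + 1 + f + 1) := by
        have e : k + 1 + (f + 1) + 1 = k + 1 + 1 + f + 1 := by omega
        rwa [e] at h2
      obtain ⟨j, hj, hj1, hj2⟩ := ih (k + 1) n (by omega) h2'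
      refine ⟨j, ?_, hj1, hj2⟩
      have e1 : (k : Int) + 1 + 1 = ((k + 1 : Nat) : Int) + 1 := by push_cast; ring
      have e2 : (3:Int) ^ (k + 1) * 3 = 3 ^ (k + 1 + 1) := (pow_succ 3 (k + 1)).symm
      have e3 : sInt (k + 1) + 3 ^ (k + 1) = sInt (k + 1 + 1) := by
        rw [sInt_add_pow (k + 1)]
      rw [e1, e2, e3, hj]
    · rw [if_neg hle]
      refine ⟨k, rfl, h1, ?_⟩
      have e : sInt (k + 2) = sInt (k + 1 + 1) := rfl
      omega

theorem key (L : Nat) : ∀ (m : Int) (fuel : Nat), 0 ≤ m → m < 3 ^ (L + 1) → L + 1 ≤ fuel →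
    gA fuel (sInt (L + 1) + m - 1) = dig (L + 1) m := by
  induction L with
  | zero =>
    intro m fuel h0 h3 hf
    obtain ⟨f, rfl⟩ : ∃ f, fuel = f + 1 := ⟨fuel - 1, by omega⟩
    have h3' : m < 3 := by simpa using h3
    have hs : sInt (0 + 1) = 1 := by decide
    rw [hs, show (1:Int) + m - 1 = m by ring]
    have hA1 : gA (f + 1) m = chD (m % 3) :: (if m / 3 = 0 then [] else gA f (m / 3 - 1)) := rfl
    have hB1 : dig (0 + 1) m = [chD (m % 3)] := rfl
    rw [hA1, hB1, if_pos (by omega : m / 3 = 0)]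
  | succ L ih =>
    intro m fuel h0 h3 hf
    obtain ⟨f, rfl⟩ : ∃ f, fuel = f + 1 := ⟨fuel - 1, by omega⟩
    have hs : sInt (L + 1 + 1) = 3 * sInt (L + 1) + 1 := sInt_succ (L + 1)
    have hp : (1:Int) ≤ sInt (L + 1) := sInt_pos L
    have hpow : m < 3 * 3 ^ (L + 1) := by
      have he : (3:Int) ^ (L + 1 + 1) = 3 ^ (L + 1) * 3 := pow_succ 3 (L + 1)
      omega
    set s := sInt (L + 1) with hsdef
    have hdiv : sInt (L + 1 + 1) + m - 1 = 3 * s + m := by omega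
    rw [hdiv]
    have hmod : (3 * s + m) % 3 = m % 3 := by omega
    have hq : (3 * s + m) / 3 = s + m / 3 := by omega
    have hq0 : ¬ (s + m / 3 = 0) := by omega
    have hA1 : gA (f + 1) (3 * s + m) = chD ((3 * s + m) % 3) ::
        (if (3 * s + m) / 3 = 0 then [] else gA f ((3 * s + m) / 3 - 1)) := rfl
    have hB1 : dig (L + 1 + 1) m = chD (m % 3) :: dig (L + 1) (m / 3) := rfl
    rw [hA1, hB1, hmod, hq, if_neg hq0, ih (m / 3) f (by omega) (by omega) (by omega)]

-- ===== VERDICT (by name: the statement is the Claim_ definition above) =====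
theorem solution_spec : Claim_equal_solution := by
  intro n _ hn
  have hn1 : (1:Int) ≤ n := hn
  unfold Spec_solution solution solution_alt
  rw [PySem.Str.slice?_none_none_neg_one]
  simp only [Option.getD_some]
  -- evaluate B's length loop
  have hstart : sInt 1 = 1 := by decide
  have hfuel : n < sInt (0 + 1 + n.toNat + 1) := by
    have h := lt_sInt_self n.toNat
    have : (n.toNat : Int) = n := Int.toNat_of_nonneg (by omega)
    rw [this] at h
    have e : 0 + 1 + n.toNat + 1 = n.toNat + 2 := by omega
    rwa [e]
  obtain ⟨j, hj, hj1, hj2⟩ := lenLoop_spec n.toNat 0 n (by rw [hstart]; omega) hfuel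
  have h30 : ((3:Int) ^ (0 + 1)) = 3 := by norm_num
  rw [hstart, h30] at hj
  have e0 : ((0 : Nat) : Int) + 1 = 1 := by norm_num
  rw [e0] at hj
  rw [hj]
  -- the digit count
  have htn : ((j : Int) + 1).toNat = j + 1 := by omega
  rw [htn]
  set m := n - sInt (j + 1) with hm
  have hm0 : 0 ≤ m := by omega
  have hmlt : m < 3 ^ (j + 1) := by
    have hsp : sInt (j + 2) = sInt (j + 1) + 3 ^ (j + 1) := sInt_add_pow (j + 1)
    omega
  -- fuel of A's loop suffices for j+1 digits
  have hge := sInt_ge j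
  have hfA : j + 1 ≤ (n - 1).toNat + 1 := by omega
  have hA := A_toList ((n - 1).toNat + 1) (n - 1) "" (by omega)
  have hB := B_toList (j + 1) m ""
  have hkey := key j m ((n - 1).toNat + 1) hm0 hmlt hfA
  have harg : n - 1 = sInt (j + 1) + m - 1 := by omega
  rw [← harg] at hkey
  apply String.ext
  simp only [String.toList_ofList] at *
  rw [hA, hB, hkey]
  simp
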